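-- pv_equiv track=rewrite | github.com/anujthakreG/Python | dsa_practice.py | fucn
-- ===== SOURCE A (Python) =====
-- def fucn(s :str) -> bool:
--     s = list(s)
--     n = len(s)
--     start = 0
--     i,j = 0 ,n-1
--     while i < j :
--         if s[i] == "-":
--             i+=1
--             continue
--         if s[j] == "-":
--             j-=1
--             continue
--         else :
--             s[i],s[j] = s[j],s[i]
--             i+=1
--             j-=1
--     return "".join(s)
-- ===== SOURCE B (Python) =====
-- def fucn(s: str) -> str:
--     rev = [c for c in s if c != '-']
--     rev.reverse()
--     out = []
--     k = 0
--     for c in s: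
--         if c == '-':
--             out.append('-')
--         else:
--             out.append(rev[k])
--             k += 1
--     return "".join(out)
-- ===== Notes on version B (the rewrite author's own statement) =====
-- stated objective: alternative
-- what changed: Replaces the symmetric two-pointer in-place swap with a filter-then-reverse of the non-dash characters followed by a single forward reconstruction pass that reinserts dashes.
import Mathlib
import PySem

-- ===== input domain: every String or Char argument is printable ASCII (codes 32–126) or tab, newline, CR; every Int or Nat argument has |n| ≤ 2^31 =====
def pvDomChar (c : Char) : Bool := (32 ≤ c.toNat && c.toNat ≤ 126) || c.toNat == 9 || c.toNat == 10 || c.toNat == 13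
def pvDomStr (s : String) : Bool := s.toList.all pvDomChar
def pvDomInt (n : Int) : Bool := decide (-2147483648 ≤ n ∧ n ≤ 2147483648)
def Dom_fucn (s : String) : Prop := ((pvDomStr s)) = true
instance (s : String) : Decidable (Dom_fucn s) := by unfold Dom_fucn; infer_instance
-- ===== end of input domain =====

-- B replaces A's symmetric two-pointer swap by filter-reverse of the non-dash
-- characters plus one forward reconstruction pass (objective: alternative).

-- ===== PORT A =====
-- two-pointer loop of A; indices are always in range when called from fucn,
-- so s[i]/s[j] are ported as getD with an unreachable default
def fucnLoop (l : List Char) (i j : Nat) : List Char :=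
  if h : i < j then
    if l.getD i ' ' = '-' then fucnLoop l (i + 1) j
    else if l.getD j ' ' = '-' then fucnLoop l i (j - 1)
    else fucnLoop ((l.set i (l.getD j ' ')).set j (l.getD i ' ')) (i + 1) (j - 1)
  else l
termination_by j - i
decreasing_by all_goals omega

def fucn (s : String) : String :=
  String.mk (fucnLoop s.toList 0 (s.toList.length - 1))

-- ===== PORT B =====
-- forward pass: keep dashes, pop the next reversed non-dash char otherwise
def fucnRebuild : List Char → List Char → List Char
  | [], _ => []
  | c :: t, r =>
    if c = '-' then '-' :: fucnRebuild t r
    else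
      match r with
      | x :: rs => x :: fucnRebuild t rs
      | [] => []      -- unreachable: r holds one char per non-dash char of the string

def fucn_alt (s : String) : String :=
  String.mk (fucnRebuild s.toList ((s.toList.filter (· != '-')).reverse))

-- ===== PRECONDITION & SPEC =====
def Spec_fucn (s : String) (out : String) : Prop := out = fucn_alt s
instance (s : String) (out : String) : Decidable (Spec_fucn s out) := by unfold Spec_fucn; infer_instance

-- ===== CLAIM (what is proved, stated in full; the proofs are below) =====
def Claim_equal_fucn : Prop := ∀ (s : String), Dom_fucn s → Spec_fucn s (fucn s)

-- ===== LEMMAS AND PROOFS =====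

-- the segment of l from index i to index j (inclusive)
def pvSeg (l : List Char) (i j : Nat) : List Char := (l.drop i).take (j + 1 - i)

theorem pvSeg_single (l : List Char) (i : Nat) (h : i < l.length) :
    pvSeg l i i = [l[i]] := by
  unfold pvSeg
  rw [show i + 1 - i = 1 from by omega, List.drop_eq_getElem_cons h]
  rfl

theorem pvSeg_cons (l : List Char) (i j : Nat) (hij : i < j) (hj : j < l.length) :
    pvSeg l i j = l[i]'(by omega) :: pvSeg l (i + 1) j := by
  unfold pvSeg
  rw [List.drop_eq_getElem_cons (by omega : i < l.length)]
  have h1 : j + 1 - i = (j - i) + 1 := by omega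
  have h2 : j + 1 - (i + 1) = j - i := by omega
  rw [h1, h2, List.take_succ_cons]

theorem pvSeg_concat (l : List Char) (i j : Nat) (hij : i ≤ j) (hj1 : 1 ≤ j)
    (hj : j < l.length) :
    pvSeg l i j = pvSeg l i (j - 1) ++ [l[j]] := by
  unfold pvSeg
  have h1 : j + 1 - i = (j - i) + 1 := by omega
  have h2 : (j - 1) + 1 - i = j - i := by omega
  have h3 : j - i < (l.drop i).length := by simp; omega
  rw [h1, h2, List.take_succ, List.getElem?_eq_getElem h3]
  congr 1
  simp [List.getElem_drop]
  congr 1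
  omega

theorem fucnRebuild_dash (x r : List Char)
    (hr : r.length = (x.filter (· != '-')).length) :
    fucnRebuild (x ++ ['-']) r = fucnRebuild x r ++ ['-'] := by
  induction x generalizing r with
  | nil =>
    simp at hr
    subst hr
    simp [fucnRebuild]
  | cons c t ih =>
    by_cases hc : c = '-'
    · subst hc
      simp [fucnRebuild, ih r (by simpa using hr)]
    · cases r with
      | nil => simp [List.filter_cons, hc] at hr
      | cons x' rs =>
        have hr' : rs.length = (t.filter (· != '-')).length := by
          simp [List.filter_cons, hc] at hr; simpa using hr
        simp [fucnRebuild, hc, ih rs hr']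

theorem fucnRebuild_pair (x r : List Char) (c y : Char) (hc : c ≠ '-')
    (hr : r.length = (x.filter (· != '-')).length) :
    fucnRebuild (x ++ [c]) (r ++ [y]) = fucnRebuild x r ++ [y] := by
  induction x generalizing r with
  | nil =>
    simp at hr
    subst hr
    simp [fucnRebuild, hc]
  | cons d t ih =>
    by_cases hd : d = '-'
    · subst hd
      simp [fucnRebuild, ih r (by simpa using hr)]
    · cases r with
      | nil => simp [List.filter_cons, hd] at hr
      | cons x' rs =>
        have hr' : rs.length = (t.filter (· != '-')).length := by
          simp [List.filter_cons, hd] at hr; simpa using hr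
        simp [fucnRebuild, hd, ih rs hr']

-- the invariant of A's two-pointer loop: outside [i, j] the list is untouched,
-- inside the non-dash characters are reversed (= B's reconstruction on the segment)
theorem fucnLoop_eq : ∀ (n : Nat) (l : List Char) (i j : Nat), j - i ≤ n →
    i ≤ j + 1 → j < l.length →
    fucnLoop l i j =
      l.take i ++
        fucnRebuild (pvSeg l i j) (((pvSeg l i j).filter (· != '-')).reverse) ++
        l.drop (j + 1) := by
  intro n
  induction n with
  | zero =>
    intro l i j hfuel hij hj
    have hnotlt : ¬ i < j := by omega
    rw [fucnLoop, dif_neg hnotlt]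
    rcases (by omega : i = j ∨ i = j + 1) with h | h
    · subst h
      rw [pvSeg_single l i hj]
      have hone : fucnRebuild [l[i]] (([l[i]].filter (· != '-')).reverse) = [l[i]] := by
        by_cases hc : l[i] = '-'
        · simp [fucnRebuild, List.filter_cons, hc]
        · simp [fucnRebuild, List.filter_cons, hc]
      rw [hone]
      rw [show l.take i ++ [l[i]] ++ l.drop (i + 1) = l from by
        rw [List.append_assoc, List.singleton_append, List.getElem_cons_drop,
            List.take_append_drop]]
    · subst h
      have : pvSeg l (j + 1) j = [] := by
        unfold pvSeg; simp
      rw [this]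
      simp [fucnRebuild, List.take_append_drop]
  | succ n ih =>
    intro l i j hfuel hij hj
    by_cases hlt : i < j
    · have hi : i < l.length := by omega
      rw [fucnLoop, dif_pos hlt]
      rw [List.getD_eq_getElem l ' ' hi, List.getD_eq_getElem l ' ' hj]
      by_cases hci : l[i] = '-'
      · -- left pointer skips a dash
        rw [if_pos hci]
        rw [ih l (i + 1) j (by omega) (by omega) hj]
        rw [pvSeg_cons l i j hlt hj, hci]
        simp only [List.filter_cons]
        norm_num
        rw [show fucnRebuild ('-' :: pvSeg l (i+1) j) ((pvSeg l (i+1) j).filter (· != '-')).reverse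
              = '-' :: fucnRebuild (pvSeg l (i+1) j) ((pvSeg l (i+1) j).filter (· != '-')).reverse
            from by simp [fucnRebuild]]
        rw [List.take_succ, List.getElem?_eq_getElem hi, hci]
        simp
      · rw [if_neg hci]
        by_cases hcj : l[j] = '-'
        · -- right pointer skips a dash
          rw [if_pos hcj]
          rw [ih l i (j - 1) (by omega) (by omega) (by omega)]
          rw [pvSeg_concat l i j (by omega) (by omega) hj, hcj]
          have hflt : (('-' : Char) != '-') = false := by decide
          rw [List.filter_append]
          simp only [List.filter, hflt]
          rw [fucnRebuild_dash _ _ (by simp)]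
          have hdrop : l.drop ((j - 1) + 1) = '-' :: l.drop (j + 1) := by
            rw [show (j - 1) + 1 = j from by omega,
                List.drop_eq_getElem_cons hj, hcj]
          rw [hdrop]
          simp
        · -- swap
          rw [if_neg hcj]
          have hlen' : ((l.set i l[j]).set j l[i]).length = l.length := by simp
          rw [ih ((l.set i l[j]).set j l[i]) (i + 1) (j - 1) (by omega) (by omega) (by omega)]
          -- segment of the swapped list between the pointers equals that of l
          have hmid : pvSeg ((l.set i l[j]).set j l[i]) (i + 1) (j - 1) = pvSeg l (i + 1) (j - 1) := by
            unfold pvSeg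
            apply List.ext_getElem
            · simp
            · intro k h1 h2
              simp only [List.getElem_take, List.getElem_drop]
              have hki : i + 1 + k < j := by
                simp at h1; omega
              rw [List.getElem_set_ne (by omega), List.getElem_set_ne (by omega)]
          rw [hmid]
          -- decompose segment of l as l[i] :: mid ++ [l[j]]
          have hseg : pvSeg l i j = l[i]'hi :: (pvSeg l (i + 1) (j - 1) ++ [l[j]]) := by
            rw [pvSeg_cons l i j hlt hj,
                pvSeg_concat l (i + 1) j (by omega) (by omega) hj]
          rw [hseg]
          have hfa : ((l[i]'hi : Char) != '-') = true := by simpa using hci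
          have hfb : ((l[j] : Char) != '-') = true := by simpa using hcj
          have hfilter : (((l[i]'hi) :: (pvSeg l (i + 1) (j - 1) ++ [l[j]])).filter (· != '-')).reverse
              = l[j] :: (((pvSeg l (i + 1) (j - 1)).filter (· != '-')).reverse ++ [l[i]'hi]) := by
            simp [List.filter_cons, List.filter_append, hfa, hfb]
          rw [hfilter]
          rw [show fucnRebuild ((l[i]'hi) :: (pvSeg l (i + 1) (j - 1) ++ [l[j]]))
                (l[j] :: (((pvSeg l (i + 1) (j - 1)).filter (· != '-')).reverse ++ [l[i]'hi]))
                = l[j] :: fucnRebuild (pvSeg l (i + 1) (j - 1) ++ [l[j]])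
                    (((pvSeg l (i + 1) (j - 1)).filter (· != '-')).reverse ++ [l[i]'hi])
              from by simp [fucnRebuild, hci]]
          rw [fucnRebuild_pair (pvSeg l (i + 1) (j - 1)) _ l[j] (l[i]'hi) hcj (by simp)]
          -- the pieces of the swapped list around the recursive segment
          have htake : ((l.set i l[j]).set j l[i]).take (i + 1) = l.take i ++ [l[j]] := by
            apply List.ext_getElem
            · simp; omega
            · intro k h1 h2
              simp only [List.length_take, hlen'] at h1
              by_cases hki : k < i
              · rw [List.getElem_take, List.getElem_set_ne (by omega),
                    List.getElem_set_ne (by omega),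
                    List.getElem_append_left (by simp; omega), List.getElem_take]
              · have hkeq : k = i := by omega
                subst hkeq
                rw [List.getElem_take, List.getElem_set_ne (by omega), List.getElem_set_self]
                rw [List.getElem_append_right (by simp)]
                simp
          have hdrop : ((l.set i l[j]).set j l[i]).drop ((j - 1) + 1) = l[i]'hi :: l.drop (j + 1) := by
            rw [show (j - 1) + 1 = j from by omega]
            rw [List.drop_eq_getElem_cons (by simpa using hj :
                  j < ((l.set i l[j]).set j l[i]).length)]
            rw [List.getElem_set_self]
            congr 1
            apply List.ext_getElem
            · simp
            · intro k h1 h2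
              simp only [List.getElem_drop]
              rw [List.getElem_set_ne (by omega), List.getElem_set_ne (by omega)]
          rw [htake, hdrop]
          simp
    · -- i ≥ j: same reasoning as the base case
      exact ih l i j (by omega) hij hj

theorem fucnLoop_eq_rebuild (l : List Char) :
    fucnLoop l 0 (l.length - 1) = fucnRebuild l ((l.filter (· != '-')).reverse) := by
  cases hl : l with
  | nil => simp [fucnLoop, fucnRebuild]
  | cons c t =>
    have hlen : 1 ≤ l.length := by rw [hl]; simp
    rw [← hl]
    rw [fucnLoop_eq l.length l 0 (l.length - 1) (by omega) (by omega) (by omega)]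
    have hseg : pvSeg l 0 (l.length - 1) = l := by
      unfold pvSeg
      rw [show l.length - 1 + 1 - 0 = l.length from by omega]
      simp
    rw [hseg]
    simp [show l.length - 1 + 1 = l.length from by omega]

-- ===== VERDICT (by name: the statement is the Claim_ definition above) =====
theorem fucn_spec : Claim_equal_fucn := by
  intro s _
  unfold Spec_fucn fucn fucn_alt
  rw [fucnLoop_eq_rebuild]
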